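-- pv_equiv track=rewrite | github.com/ChenChienYi/tunix-gemma-reasoning | data_cleaning/clean_openmath.py | count_duplicate_questions
-- ===== SOURCE A (Python) =====
-- def count_duplicate_questions(dataset):
--     """Counts duplicate questions in the dataset."""
--     seen = set()
--     duplicate_count = 0
--
--     for q in dataset['question']:
--         if q in seen:
--             duplicate_count += 1
--         else:
--             seen.add(q)
--
--     return duplicate_count
-- ===== SOURCE B (Python) =====
-- def count_duplicate_questions(dataset):
--     """Counts duplicate questions in the dataset."""
--     qs = list(dataset['question'])
--     return len(qs) - len(set(qs))
-- ===== Notes on version B (the rewrite author's own statement) =====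
-- stated objective: simpler
-- what changed: Replaces the incremental seen-set scan with duplicate counter by the closed form len(qs) - len(set(qs)) (total minus distinct).
import Mathlib
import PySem

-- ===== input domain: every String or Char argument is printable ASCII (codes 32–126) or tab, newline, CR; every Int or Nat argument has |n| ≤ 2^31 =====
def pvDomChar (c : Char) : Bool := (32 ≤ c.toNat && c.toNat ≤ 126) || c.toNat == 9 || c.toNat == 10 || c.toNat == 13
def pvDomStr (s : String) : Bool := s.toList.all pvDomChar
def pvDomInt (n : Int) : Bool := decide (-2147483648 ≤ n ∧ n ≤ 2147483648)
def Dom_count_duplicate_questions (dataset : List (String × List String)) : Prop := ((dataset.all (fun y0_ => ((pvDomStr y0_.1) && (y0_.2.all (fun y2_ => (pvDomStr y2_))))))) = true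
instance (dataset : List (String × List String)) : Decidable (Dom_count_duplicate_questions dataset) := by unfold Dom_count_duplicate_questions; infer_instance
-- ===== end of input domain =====

-- B computes the duplicate count as total length minus distinct count instead of A's
-- incremental seen-set scan ('simpler'); same O(n), identical result everywhere A returns.

-- ===== PORT A =====
-- seen-set / counter loop, step for step
def count_duplicate_questions (dataset : List (String × List String)) : Int :=
  let qs := (PySem.Dict.mk dataset).getD "question" []
  (qs.foldl
    (fun (st : PySem.Set String × Int) q =>
      if PySem.Set.contains st.1 q then (st.1, st.2 + 1) else (PySem.Set.add st.1 q, st.2))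
    (PySem.Set.empty, 0)).2

-- ===== PORT B =====
-- len(qs) - len(set(qs))
def count_duplicate_questions_alt (dataset : List (String × List String)) : Int :=
  let qs := (PySem.Dict.mk dataset).getD "question" []
  (qs.length : Int) - ((PySem.Set.ofList qs).length : Int)

-- ===== PRECONDITION & SPEC =====
-- A raises KeyError when the dict has no 'question' key; Pre_ excludes exactly that.
def Pre_count_duplicate_questions (dataset : List (String × List String)) : Prop :=
  (PySem.Dict.mk dataset).contains "question" = true
instance (dataset : List (String × List String)) : Decidable (Pre_count_duplicate_questions dataset) := by
  unfold Pre_count_duplicate_questions; infer_instance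

def pvWitness_count_duplicate_questions : (List (String × List String)) :=
  [("question", ["a", "b", "a"])]

def Spec_count_duplicate_questions (dataset : List (String × List String)) (out : Int) : Prop := out = count_duplicate_questions_alt dataset
instance (dataset : List (String × List String)) (out : Int) : Decidable (Spec_count_duplicate_questions dataset out) := by unfold Spec_count_duplicate_questions; infer_instance

-- ===== CLAIM (what is proved, stated in full; the proofs are below) =====
def Claim_equal_count_duplicate_questions : Prop := ∀ (dataset : List (String × List String)), Dom_count_duplicate_questions dataset → Pre_count_duplicate_questions dataset → Spec_count_duplicate_questions dataset (count_duplicate_questions dataset)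

-- ===== LEMMAS AND PROOFS =====

-- Invariant of A's loop: the running count plus the size of the seen set grows by one per element.
theorem dupLoop_invariant (qs : List String) :
    ∀ (s : PySem.Set String) (c : Int),
      (qs.foldl
        (fun (st : PySem.Set String × Int) q =>
          if PySem.Set.contains st.1 q then (st.1, st.2 + 1) else (PySem.Set.add st.1 q, st.2))
        (s, c)).2 + ((PySem.Set.update s qs).length : Int)
      = c + (s.length : Int) + (qs.length : Int) := by
  induction qs with
  | nil => intro s c; simp [PySem.Set.update]
  | cons q qs ih =>
    intro s c
    rw [PySem.Set.update_cons]
    by_cases h : PySem.Set.contains s q = true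
    · have hadd : PySem.Set.add s q = s := by unfold PySem.Set.add; rw [if_pos h]
      simp only [List.foldl_cons, h, if_true, hadd, List.length_cons]
      have := ih s (c + 1)
      push_cast at this ⊢
      omega
    · have hc : PySem.Set.contains s q = false := by simpa using h
      have hadd : PySem.Set.add s q = s ++ [q] := by unfold PySem.Set.add; rw [if_neg h]
      simp only [List.foldl_cons, hc, Bool.false_eq_true, if_false, hadd, List.length_cons]
      have := ih (s ++ [q]) c
      simp only [List.length_append, List.length_cons, List.length_nil] at this
      push_cast at this ⊢
      omega

-- ===== VERDICT (by name: the statement is the Claim_ definition above) =====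
theorem count_duplicate_questions_spec : Claim_equal_count_duplicate_questions := by
  intro dataset _ _
  unfold Spec_count_duplicate_questions count_duplicate_questions count_duplicate_questions_alt
  simp only []
  have h := dupLoop_invariant ((PySem.Dict.mk dataset).getD "question" []) PySem.Set.empty 0
  simp only [PySem.Set.empty] at h
  rw [PySem.Set.update_nil_left] at h
  simp only [PySem.Set.empty, List.length_nil, Nat.cast_zero] at h ⊢
  omega
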